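-- pv_equiv track=rewrite | github.com/AMF-FLX/AMF-BASE-QAQC | processing/data_qaqc_auto_run.py | get_potential_res
-- ===== SOURCE A (Python) =====
-- def get_potential_res(last_upload_lookup):
--
--     last_upload_res_lookup = {}
--
--     for site_id, filenames in last_upload_lookup.items():
--         res = None
--         for filename in filenames:
--             if '_HH_' in filename:
--                 res = 'HH'
--             elif '_HR_' in filename:
--                 res = 'HR'
--             else:
--                 continue
--         last_upload_res_lookup[site_id] = res
--
--     return last_upload_res_lookup
-- ===== SOURCE B (Python) =====
-- def get_potential_res(last_upload_lookup):
--     def classify(filenames):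
--         # scan from the end: the last matching filename decides, so stop at
--         # the first match seen in reverse order
--         for f in reversed(filenames):
--             if '_HH_' in f:
--                 return 'HH'
--             if '_HR_' in f:
--                 return 'HR'
--         return None
--
--     return {site_id: classify(filenames)
--             for site_id, filenames in last_upload_lookup.items()}
-- ===== Notes on version B (the rewrite author's own statement) =====
-- stated objective: alternative
-- what changed: Replaces A's exhaustive forward scan that keeps overwriting a running result with a reversed scan that short-circuits at the first matching filename from the end (a helper with early returns plus a dict comprehension).
import Mathlib
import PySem

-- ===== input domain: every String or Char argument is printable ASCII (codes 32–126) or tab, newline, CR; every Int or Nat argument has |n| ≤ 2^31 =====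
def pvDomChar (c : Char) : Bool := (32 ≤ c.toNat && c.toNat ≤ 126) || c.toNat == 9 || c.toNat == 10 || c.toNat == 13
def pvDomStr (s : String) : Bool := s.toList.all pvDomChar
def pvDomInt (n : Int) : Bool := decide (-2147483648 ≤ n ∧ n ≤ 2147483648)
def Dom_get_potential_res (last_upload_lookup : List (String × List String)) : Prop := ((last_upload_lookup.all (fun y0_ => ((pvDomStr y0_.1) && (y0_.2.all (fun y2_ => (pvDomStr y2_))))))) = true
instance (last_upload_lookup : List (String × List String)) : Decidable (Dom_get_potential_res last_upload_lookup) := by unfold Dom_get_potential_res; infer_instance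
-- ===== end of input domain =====

-- B replaces A's exhaustive forward overwrite scan with a reversed scan that
-- returns at the first match from the end (alternative decomposition); same results.

-- ===== PORT A =====
def get_potential_res (last_upload_lookup : List (String × List String)) : List (String × Option String) :=
  (last_upload_lookup.foldl
    (fun (acc : PySem.Dict String (Option String)) p =>
      let res : Option String := p.2.foldl
        (fun r filename =>
          if PySem.Str.isIn "_HH_" filename then some "HH"
          else if PySem.Str.isIn "_HR_" filename then some "HR"
          else r) none
      acc.insert p.1 res)
    PySem.Dict.empty).items

-- ===== PORT B =====
-- 'for f in reversed(filenames): … return …' — early-return loop = structural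
-- recursion on the reversed list
def pvClassify : List String → Option String
  | [] => none
  | f :: rest =>
      if PySem.Str.isIn "_HH_" f then some "HH"
      else if PySem.Str.isIn "_HR_" f then some "HR"
      else pvClassify rest

def get_potential_res_alt (last_upload_lookup : List (String × List String)) : List (String × Option String) :=
  (last_upload_lookup.foldl
    (fun (acc : PySem.Dict String (Option String)) p =>
      acc.insert p.1 (pvClassify p.2.reverse))
    PySem.Dict.empty).items

-- ===== PRECONDITION & SPEC =====
def Spec_get_potential_res (last_upload_lookup : List (String × List String)) (out : List (String × Option String)) : Prop := out = get_potential_res_alt last_upload_lookup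
instance (last_upload_lookup : List (String × List String)) (out : List (String × Option String)) : Decidable (Spec_get_potential_res last_upload_lookup out) := by unfold Spec_get_potential_res; infer_instance

-- ===== CLAIM (what is proved, stated in full; the proofs are below) =====
def Claim_equal_get_potential_res : Prop := ∀ (last_upload_lookup : List (String × List String)), Dom_get_potential_res last_upload_lookup → Spec_get_potential_res last_upload_lookup (get_potential_res last_upload_lookup)

-- ===== LEMMAS AND PROOFS =====

-- first match found scanning l++[f] from the front is: the match in l, else f's label
theorem pvClassify_append_singleton (l : List String) (f : String) :
    pvClassify (l ++ [f])
    = (pvClassify l).or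
        (if PySem.Str.isIn "_HH_" f then some "HH"
         else if PySem.Str.isIn "_HR_" f then some "HR" else none) := by
  induction l with
  | nil => simp [pvClassify]; split_ifs <;> rfl
  | cons g l ih =>
    simp only [List.cons_append, pvClassify, ih]
    split_ifs <;> rfl

-- A's inner overwrite scan equals first-match-in-reverse, modulo the initial value
theorem pv_inner_eq (fs : List String) (init : Option String) :
    fs.foldl
      (fun r filename =>
        if PySem.Str.isIn "_HH_" filename then some "HH"
        else if PySem.Str.isIn "_HR_" filename then some "HR"
        else r) init
    = (pvClassify fs.reverse).or init := by
  induction fs generalizing init with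
  | nil => rfl
  | cons f fs ih =>
    simp only [List.foldl_cons, List.reverse_cons, ih, pvClassify_append_singleton]
    cases pvClassify fs.reverse <;> split_ifs <;> rfl

theorem pv_outer_eq (l : List (String × List String)) (acc : PySem.Dict String (Option String)) :
    l.foldl
      (fun (acc : PySem.Dict String (Option String)) p =>
        let res : Option String := p.2.foldl
          (fun r filename =>
            if PySem.Str.isIn "_HH_" filename then some "HH"
            else if PySem.Str.isIn "_HR_" filename then some "HR"
            else r) none
        acc.insert p.1 res) acc
    = l.foldl
      (fun (acc : PySem.Dict String (Option String)) p =>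
        acc.insert p.1 (pvClassify p.2.reverse)) acc := by
  simp only [pv_inner_eq, Option.or_none]

-- ===== VERDICT (by name: the statement is the Claim_ definition above) =====
theorem get_potential_res_spec : Claim_equal_get_potential_res := by
  intro l _
  unfold Spec_get_potential_res get_potential_res get_potential_res_alt
  rw [pv_outer_eq]
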